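-- pv_equiv track=rewrite | github.com/FranciscoMunguiaGaleano/RLforHRI | src/irohms_inverse_kinematics.py | get_sub_goals
-- ===== SOURCE A (Python) =====
-- def get_sub_goals(instructions,temp_objects):
--     goals={}
--     for ins in instructions:
--         keys=[]
--         for type_object in ins[0]:
--             if type_object[0][2]=="*":
--                 for key in temp_objects.keys():
--                     if type_object[0][:-1]== key[:2]:
--                         keys.append(key)
--             else:
--                 for key in temp_objects.keys():
--                     if type_object[0]== key[:3]:
--                         keys.append(key)
--                 pass
--         if ins[1] is not None:
--             goals[ins[1]]=keys
--     return goals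
-- ===== SOURCE B (Python) =====
-- def get_sub_goals(instructions, temp_objects):
--     # Build prefix -> matching-keys indexes once, then each type_object is a single dict lookup.
--     idx2 = {}
--     idx3 = {}
--     for key in temp_objects:
--         idx2.setdefault(key[:2], []).append(key)
--         idx3.setdefault(key[:3], []).append(key)
--     goals = {}
--     for ins in instructions:
--         keys = []
--         for type_object in ins[0]:
--             head = type_object[0]
--             if head[2] == "*":
--                 keys += idx2.get(head[:-1], [])
--             else:
--                 keys += idx3.get(head, [])
--         if ins[1] is not None:
--             goals[ins[1]] = keys
--     return goals
-- ===== Notes on version B (the rewrite author's own statement) =====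
-- stated objective: alternative
-- what changed: Instead of scanning all temp_object keys for every type_object of every instruction, B builds two prefix->keys index dicts (key[:2], key[:3]) once and turns each inner scan into a single dict lookup; cost shifts from O(I*T*K) scans to one O(K) indexing pass plus lookups (not measurably faster on a timing run's input family).
import Mathlib
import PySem

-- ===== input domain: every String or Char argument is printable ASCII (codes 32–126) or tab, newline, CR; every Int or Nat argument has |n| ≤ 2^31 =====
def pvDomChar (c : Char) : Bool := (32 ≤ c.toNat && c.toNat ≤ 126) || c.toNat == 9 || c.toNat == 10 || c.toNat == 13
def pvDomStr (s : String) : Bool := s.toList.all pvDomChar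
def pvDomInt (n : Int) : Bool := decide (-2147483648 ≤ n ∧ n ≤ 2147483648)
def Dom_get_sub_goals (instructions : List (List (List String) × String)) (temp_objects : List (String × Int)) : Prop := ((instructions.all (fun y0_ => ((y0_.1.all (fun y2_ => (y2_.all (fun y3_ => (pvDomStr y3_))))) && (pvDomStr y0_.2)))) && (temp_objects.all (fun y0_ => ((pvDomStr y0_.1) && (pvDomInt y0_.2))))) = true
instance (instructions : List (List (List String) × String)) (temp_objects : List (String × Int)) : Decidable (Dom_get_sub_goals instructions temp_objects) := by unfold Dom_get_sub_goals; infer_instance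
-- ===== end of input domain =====

-- B replaces A's per-type_object scan over all temp_object keys by two prefix->keys index dicts built once (each inner scan becomes one lookup; an alternative algorithm, not claimed faster).
-- 'ins[1] is not None' is always true under the type convention (ins.2 : String), so both ports insert unconditionally.

-- ===== PORT A =====
def get_sub_goals (instructions : List (List (List String) × String)) (temp_objects : List (String × Int)) : List (String × List String) :=
  let tks := (PySem.Dict.ofList temp_objects).keys
  (instructions.foldl (fun (goals : PySem.Dict String (List String)) ins =>
    let keys := ins.1.foldl (fun keys type_object =>
      match type_object with
      | [] => keys  -- Python raises IndexError here (excluded by Pre_)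
      | s :: _ =>
        -- 's[2] == "*"': Python raises if len(s) < 3 (excluded by Pre_); pyGet? is none there
        if PySem.Str.pyGet? s 2 == some '*' then
          tks.foldl (fun keys key =>
            if PySem.Str.slice s none (some (-1)) == PySem.Str.slice key none (some 2)
            then keys ++ [key] else keys) keys
        else
          tks.foldl (fun keys key =>
            if s == PySem.Str.slice key none (some 3)
            then keys ++ [key] else keys) keys) ([] : List String)
    goals.insert ins.2 keys) PySem.Dict.empty).items

-- ===== PORT B =====
-- 'd.setdefault(p, []).append(key)' sets d[p] = d.get(p, []) + [key]: exactly Dict.modify p [] (· ++ [key])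
def get_sub_goals_alt (instructions : List (List (List String) × String)) (temp_objects : List (String × Int)) : List (String × List String) :=
  let tks := (PySem.Dict.ofList temp_objects).keys
  let idxs := tks.foldl (fun (d : (PySem.Dict String (List String)) × (PySem.Dict String (List String))) key =>
      (d.1.modify (PySem.Str.slice key none (some 2)) [] (· ++ [key]),
       d.2.modify (PySem.Str.slice key none (some 3)) [] (· ++ [key])))
      (PySem.Dict.empty, PySem.Dict.empty)
  (instructions.foldl (fun (goals : PySem.Dict String (List String)) ins =>
    let keys := ins.1.foldl (fun keys type_object =>
      match type_object with
      | [] => keys  -- Python raises IndexError here (excluded by Pre_)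
      | s :: _ =>
        if PySem.Str.pyGet? s 2 == some '*' then
          keys ++ idxs.1.getD (PySem.Str.slice s none (some (-1))) []
        else
          keys ++ idxs.2.getD s []) ([] : List String)
    goals.insert ins.2 keys) PySem.Dict.empty).items

-- ===== PRECONDITION & SPEC =====
-- Pre_ excludes exactly the inputs where Python A raises IndexError: an instruction containing an
-- empty type_object list (type_object[0]) or one whose first string has fewer than 3 characters (…[2]).
def Pre_get_sub_goals (instructions : List (List (List String) × String)) (temp_objects : List (String × Int)) : Prop :=
  (instructions.all (fun ins => ins.1.all (fun t =>
     !t.isEmpty && decide (3 ≤ PySem.Str.len (t.headD ""))))) = true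
instance (instructions : List (List (List String) × String)) (temp_objects : List (String × Int)) : Decidable (Pre_get_sub_goals instructions temp_objects) := by unfold Pre_get_sub_goals; infer_instance
def pvWitness_get_sub_goals : (List (List (List String) × String)) × (List (String × Int)) :=
  ([([["ab*"], ["box"]], "g1")], [("abc", 1), ("abd", 2), ("box", 3)])
def Spec_get_sub_goals (instructions : List (List (List String) × String)) (temp_objects : List (String × Int)) (out : List (String × List String)) : Prop := out = get_sub_goals_alt instructions temp_objects
instance (instructions : List (List (List String) × String)) (temp_objects : List (String × Int)) (out : List (String × List String)) : Decidable (Spec_get_sub_goals instructions temp_objects out) := by unfold Spec_get_sub_goals; infer_instance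

-- ===== CLAIM (what is proved, stated in full; the proofs are below) =====
def Claim_equal_get_sub_goals : Prop := ∀ (instructions : List (List (List String) × String)) (temp_objects : List (String × Int)), Dom_get_sub_goals instructions temp_objects → Pre_get_sub_goals instructions temp_objects → Spec_get_sub_goals instructions temp_objects (get_sub_goals instructions temp_objects)

-- ===== LEMMAS AND PROOFS =====


-- (a == b) = (b == a) for a lawful BEq: lets us flip the prefix comparison between A's and B's filters
lemma pv_beq_comm {α : Type} [BEq α] [LawfulBEq α] (a b : α) : (a == b) = (b == a) := by
  by_cases h : a = b
  · simp [h]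
  · simp [h, Ne.symm h]

-- B's index-building loop, split into its two independent grouping loops
lemma pv_idxs (tks : List String) :
    tks.foldl (fun (d : (PySem.Dict String (List String)) × (PySem.Dict String (List String))) key =>
      (d.1.modify (PySem.Str.slice key none (some 2)) [] (· ++ [key]),
       d.2.modify (PySem.Str.slice key none (some 3)) [] (· ++ [key])))
      (PySem.Dict.empty, PySem.Dict.empty)
    = (tks.foldl (fun d key => d.modify (PySem.Str.slice key none (some 2)) [] (· ++ [key])) PySem.Dict.empty,
       tks.foldl (fun d key => d.modify (PySem.Str.slice key none (some 3)) [] (· ++ [key])) PySem.Dict.empty) := by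
  have h : ∀ (a b : PySem.Dict String (List String)),
      tks.foldl (fun (d : (PySem.Dict String (List String)) × (PySem.Dict String (List String))) key =>
        (d.1.modify (PySem.Str.slice key none (some 2)) [] (· ++ [key]),
         d.2.modify (PySem.Str.slice key none (some 3)) [] (· ++ [key]))) (a, b)
      = (tks.foldl (fun d key => d.modify (PySem.Str.slice key none (some 2)) [] (· ++ [key])) a,
         tks.foldl (fun d key => d.modify (PySem.Str.slice key none (some 3)) [] (· ++ [key])) b) := by
    induction tks with
    | nil => intro a b; rfl
    | cons x xs ih => intro a b; simp only [List.foldl_cons]; exact ih _ _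
  exact h _ _

-- looking up c in a prefix->keys grouping dict returns exactly the keys whose prefix is c, in order
lemma pv_getD_groupfold (key : String → String) (tks : List String) (c : String) :
    (tks.foldl (fun (d : PySem.Dict String (List String)) k => d.modify (key k) [] (· ++ [k])) PySem.Dict.empty).getD c []
      = tks.filter (fun k => key k == c) := by
  have h : tks.foldl (fun (d : PySem.Dict String (List String)) k => d.modify (key k) [] (· ++ [k])) PySem.Dict.empty
      = (tks.map (fun k => (key k, k))).foldl (fun d p => d.modify p.1 [] (· ++ [p.2])) PySem.Dict.empty := by
    rw [List.foldl_map]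
  rw [h, PySem.Dict.getD_foldl_modify_append]
  simp [List.filter_map, Function.comp_def]

-- one step of the per-type_object loop: A's scan over all keys equals B's index lookup
lemma pv_step_eq (tks keys : List String) (t : List String) :
    (match t with
     | [] => keys
     | s :: _ =>
       if PySem.Str.pyGet? s 2 == some '*' then
         tks.foldl (fun keys key =>
           if PySem.Str.slice s none (some (-1)) == PySem.Str.slice key none (some 2)
           then keys ++ [key] else keys) keys
       else
         tks.foldl (fun keys key =>
           if s == PySem.Str.slice key none (some 3)
           then keys ++ [key] else keys) keys)
    = (match t with
       | [] => keys
       | s :: _ =>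
         if PySem.Str.pyGet? s 2 == some '*' then
           keys ++ (tks.foldl (fun (d : PySem.Dict String (List String)) k =>
             d.modify (PySem.Str.slice k none (some 2)) [] (· ++ [k])) PySem.Dict.empty).getD
             (PySem.Str.slice s none (some (-1))) []
         else
           keys ++ (tks.foldl (fun (d : PySem.Dict String (List String)) k =>
             d.modify (PySem.Str.slice k none (some 3)) [] (· ++ [k])) PySem.Dict.empty).getD s []) := by
  cases t with
  | nil => rfl
  | cons s r =>
    simp only
    split
    · rw [pv_getD_groupfold, PySem.List.foldl_append_if_eq_filter]
      congr 1
      exact List.filter_congr (fun k _ => pv_beq_comm _ _)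
    · rw [pv_getD_groupfold, PySem.List.foldl_append_if_eq_filter]
      congr 1
      exact List.filter_congr (fun k _ => pv_beq_comm _ _)

-- ===== VERDICT (by name: the statement is the Claim_ definition above) =====
theorem get_sub_goals_spec : Claim_equal_get_sub_goals := by
  intro instructions temp_objects _ _
  unfold Spec_get_sub_goals
  simp only [get_sub_goals, get_sub_goals_alt, pv_idxs]
  congr 1
  refine PySem.List.foldl_congr_mem _ _ _ _ (fun goals ins _ => ?_)
  congr 1
  exact PySem.List.foldl_congr_mem _ _ _ _ (fun keys t _ => pv_step_eq _ keys t)
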